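-- pv_equiv track=rewrite | github.com/KSE0514/Algo | 백준/Silver/14562. 태권왕/태권왕.py | bfs
-- ===== SOURCE A (Python) =====
-- from collections import deque
--
-- def bfs(s, t):
--     dq = deque()
--     dq.append((s, t, 0)) # 내 점수, 상대 점수, 연속 발차기 횟수
--
--     while dq:
--         curS, curT, curCnt = dq.popleft()
--         if curS == curT:
--             return curCnt
--
--         for isDoublePoint in range(2):
--             newS = curS ** isDoublePoint + curS
--             newT = 3 * isDoublePoint + curT
--             if newS <= newT:
--                 dq.append((newS, newT, curCnt+1))
-- ===== SOURCE B (Python) =====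
-- def bfs(s, t):
--     # level-synchronous BFS: expand the whole frontier at once, deduplicating states per level
--     frontier = {(s, t)}
--     cnt = 0
--     while frontier:
--         if any(S == T for S, T in frontier):
--             return cnt
--         frontier = {c for S, T in frontier
--                       for c in ((S + 1, T), (2 * S, T + 3)) if c[0] <= c[1]}
--         cnt += 1
-- ===== Notes on version B (the rewrite author's own statement) =====
-- stated objective: alternative
-- what changed: Replaces the deque BFS that re-enqueues duplicate (score,score) states once per path by a level-synchronous BFS that expands the whole frontier at once and deduplicates each new frontier, exploring each state at most once per level.
import Mathlib
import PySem

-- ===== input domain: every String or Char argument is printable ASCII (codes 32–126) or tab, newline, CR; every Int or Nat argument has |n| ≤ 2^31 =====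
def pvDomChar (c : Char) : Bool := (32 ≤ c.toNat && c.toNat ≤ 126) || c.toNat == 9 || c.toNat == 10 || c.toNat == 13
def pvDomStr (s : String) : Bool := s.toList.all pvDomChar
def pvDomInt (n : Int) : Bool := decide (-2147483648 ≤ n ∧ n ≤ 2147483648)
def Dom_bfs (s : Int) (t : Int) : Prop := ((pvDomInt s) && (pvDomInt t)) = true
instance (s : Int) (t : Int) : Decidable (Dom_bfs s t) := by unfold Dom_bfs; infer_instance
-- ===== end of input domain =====

-- B replaces A's duplicate-laden deque BFS by a level-synchronous BFS that deduplicates each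
-- frontier, returning the same minimal operation count (objective: alternative algorithm,
-- avoids re-exploring duplicate states).

-- ===== PORT A =====
-- Literal port of A's deque BFS. The while-loop is made total with fuel (proved sufficient on
-- Pre_bfs below); Python's falling off the loop returns None (no Int), those inputs are outside
-- Pre_bfs and `getD 0` covers them. `curS ** isDoublePoint` is `curS ^ isDoublePoint.toNat`
-- (exact: the exponent is 0 or 1 from range(2), and 0**0 = 1 in Python as in Lean).
-- Python's deque is ported as the standard two-list functional queue: popleft takes from
-- `front` (refilling it from `back.reverse` when empty), dq.append conses onto `back`.
def bfsPushA (curS curT curCnt : Int) (back : List (Int × Int × Int)) : List (Int × Int × Int) :=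
  (PySem.List.pyRange 0 2 1).foldl (fun dq isDoublePoint =>
    let newS := curS ^ isDoublePoint.toNat + curS
    let newT := 3 * isDoublePoint + curT
    if newS ≤ newT then (newS, newT, curCnt + 1) :: dq else dq) back

def bfsLoopA : Nat → List (Int × Int × Int) → List (Int × Int × Int) → Option Int
  | 0, _, _ => none
  | fuel + 1, (curS, curT, curCnt) :: front, back =>
    if curS = curT then some curCnt
    else bfsLoopA fuel front (bfsPushA curS curT curCnt back)
  | fuel + 1, [], back =>
    match back.reverse with
    | [] => none
    | (curS, curT, curCnt) :: front =>
      if curS = curT then some curCnt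
      else bfsLoopA fuel front (bfsPushA curS curT curCnt [])

def bfsFuelA (s t : Int) : Nat := 2 ^ ((t - s).toNat + ((t + 3) - 2 * s).toNat + 3)

def bfs (s : Int) (t : Int) : Int := (bfsLoopA (bfsFuelA s t) [(s, t, 0)] []).getD 0

-- ===== PORT B =====
-- Literal port of Source B. Python's frontier sets are lists of their distinct elements in insertion
-- order (the PySem set convention): the set comprehension becomes a fold that appends each
-- admissible child not already present. The while-loop is made total with (level-count) fuel.
def bfsNextB (frontier : List (Int × Int)) : List (Int × Int) :=
  frontier.foldl (fun nxt p =>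
    [(p.1 + 1, p.2), (2 * p.1, p.2 + 3)].foldl (fun nxt c =>
      if c.1 ≤ c.2 ∧ c ∉ nxt then nxt ++ [c] else nxt) nxt) []

def bfsLoopB : Nat → Int → List (Int × Int) → Option Int
  | 0, _, _ => none
  | _ + 1, _, [] => none
  | fuel + 1, cnt, p :: rest =>
    if (p :: rest).any (fun q => q.1 == q.2) then some cnt
    else bfsLoopB fuel (cnt + 1) (bfsNextB (p :: rest))

def bfsFuelB (s t : Int) : Nat := (t - s).toNat + ((t + 3) - 2 * s).toNat + 3

def bfs_alt (s : Int) (t : Int) : Int := (bfsLoopB (bfsFuelB s t) 0 [(s, t)]).getD 0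

-- ===== PRECONDITION & SPEC =====
-- Pre_bfs excludes exactly the inputs (s > t and 2*s > t+3) on which Python A's queue empties
-- and it falls off the loop returning None, which is not an Int.
def Pre_bfs (s : Int) (t : Int) : Prop := s ≤ t ∨ 2 * s ≤ t + 3

instance (s : Int) (t : Int) : Decidable (Pre_bfs s t) := by unfold Pre_bfs; infer_instance

def pvWitness_bfs : Int × Int := (3, 7)

def Spec_bfs (s : Int) (t : Int) (out : Int) : Prop := out = bfs_alt s t
instance (s : Int) (t : Int) (out : Int) : Decidable (Spec_bfs s t out) := by unfold Spec_bfs; infer_instance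

-- ===== CLAIM (what is proved, stated in full; the proofs are below) =====
def Claim_equal_bfs : Prop := ∀ (s : Int) (t : Int), Dom_bfs s t → Pre_bfs s t → Spec_bfs s t (bfs s t)

-- ===== LEMMAS AND PROOFS =====

-- Semantic transition: admissible children of a state.
def pvStep (p : Int × Int) : List (Int × Int) :=
  (if p.1 + 1 ≤ p.2 then [(p.1 + 1, p.2)] else []) ++
  (if 2 * p.1 ≤ p.2 + 3 then [(2 * p.1, p.2 + 3)] else [])

-- BFS level multisets (A's view) and cumulative level sizes.
def pvIter (L : List (Int × Int)) : Nat → List (Int × Int)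
  | 0 => L
  | k + 1 => pvIter (L.flatMap pvStep) k

def pvSum (L : List (Int × Int)) : Nat → Nat
  | 0 => 0
  | k + 1 => L.length + pvSum (L.flatMap pvStep) k

-- B's deduplicated levels.
def pvIterB (L : List (Int × Int)) : Nat → List (Int × Int)
  | 0 => L
  | k + 1 => pvIterB (bfsNextB L) k

def pvTag (c : Int) (p : Int × Int) : Int × Int × Int := (p.1, p.2, c)

-- single-list model of A's queue, used by the proofs
def pvLoopA : Nat → List (Int × Int × Int) → Option Int
  | 0, _ => none
  | _ + 1, [] => none
  | fuel + 1, (S, T, c) :: rest =>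
    if S = T then some c else pvLoopA fuel (rest ++ (pvStep (S, T)).map (pvTag (c + 1)))

lemma loopA_cons (fuel : Nat) (S T c : Int) (rest : List (Int × Int × Int)) :
    pvLoopA (fuel + 1) ((S, T, c) :: rest)
      = if S = T then some c else pvLoopA fuel (rest ++ (pvStep (S, T)).map (pvTag (c + 1))) := rfl

lemma loopB_cons (fuel : Nat) (cnt : Int) (p : Int × Int) (rest : List (Int × Int)) :
    bfsLoopB (fuel + 1) cnt (p :: rest)
      = if (p :: rest).any (fun q => q.1 == q.2) then some cnt
        else bfsLoopB fuel (cnt + 1) (bfsNextB (p :: rest)) := rfl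

lemma pushA_eq (S T c : Int) (back : List (Int × Int × Int)) :
    bfsPushA S T c back = ((pvStep (S, T)).map (pvTag (c + 1))).reverse ++ back := by
  have hr : PySem.List.pyRange 0 2 1 = [0, 1] := by decide
  unfold bfsPushA pvStep pvTag
  rw [hr]
  simp only [List.foldl_cons, List.foldl_nil]
  norm_num
  split_ifs <;> simp_all <;> omega

lemma loopA_two_list : ∀ (fuel : Nat) (front back : List (Int × Int × Int)),
    bfsLoopA fuel front back = pvLoopA fuel (front ++ back.reverse) := by
  intro fuel
  induction fuel with
  | zero => intro front back; rfl
  | succ fuel ih =>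
    intro front back
    cases front with
    | cons h front =>
      obtain ⟨S, T, c⟩ := h
      show (if S = T then some c else bfsLoopA fuel front (bfsPushA S T c back))
        = pvLoopA (fuel + 1) (((S, T, c) :: front) ++ back.reverse)
      rw [List.cons_append, loopA_cons]
      by_cases hST : S = T
      · rw [if_pos hST, if_pos hST]
      · rw [if_neg hST, if_neg hST, ih, pushA_eq]
        have h2 : (((pvStep (S, T)).map (pvTag (c + 1))).reverse ++ back).reverse
            = back.reverse ++ (pvStep (S, T)).map (pvTag (c + 1)) := by simp
        rw [h2, List.append_assoc]
    | nil =>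
      show (match back.reverse with
        | [] => none
        | (S, T, c) :: front =>
          if S = T then some c else bfsLoopA fuel front (bfsPushA S T c [])) = _
      rcases hb : back.reverse with _ | ⟨⟨S, T, c⟩, front'⟩
      · simp only [List.nil_append]
        rfl
      · simp only [List.nil_append]
        rw [loopA_cons]
        by_cases hST : S = T
        · rw [if_pos hST, if_pos hST]
        · rw [if_neg hST, if_neg hST, ih, pushA_eq]
          simp

lemma loopA_level (L : List (Int × Int)) : ∀ (R : List (Int × Int)) (c : Int) (f : Nat),
    (∀ p ∈ L, ¬ p.1 = p.2) →
    pvLoopA (L.length + f) (L.map (pvTag c) ++ R.map (pvTag (c + 1)))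
      = pvLoopA f ((R ++ L.flatMap pvStep).map (pvTag (c + 1))) := by
  induction L with
  | nil => intro R c f _; simp
  | cons p L ih =>
    intro R c f hne
    have hp : ¬ p.1 = p.2 := hne p (by simp)
    have hlen : (p :: L).length + f = (L.length + f) + 1 := by
      rw [List.length_cons]; omega
    rw [hlen]
    have hcons : (p :: L).map (pvTag c) ++ R.map (pvTag (c + 1))
        = (p.1, p.2, c) :: (L.map (pvTag c) ++ R.map (pvTag (c + 1))) := rfl
    rw [hcons, loopA_cons, if_neg hp, Prod.mk.eta]
    have hq : L.map (pvTag c) ++ R.map (pvTag (c + 1)) ++ (pvStep p).map (pvTag (c + 1))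
        = L.map (pvTag c) ++ (R ++ pvStep p).map (pvTag (c + 1)) := by simp
    rw [hq, ih (R ++ pvStep p) c f (fun q hqm => hne q (by simp [hqm]))]
    have hfm : R ++ pvStep p ++ L.flatMap pvStep = R ++ (p :: L).flatMap pvStep := by
      rw [List.flatMap_cons, ← List.append_assoc]
    rw [hfm]

lemma loopA_found (L : List (Int × Int)) : ∀ (R : List (Int × Int)) (c : Int) (f : Nat),
    (∃ p ∈ L, p.1 = p.2) →
    pvLoopA (L.length + f + 1) (L.map (pvTag c) ++ R.map (pvTag (c + 1))) = some c := by
  induction L with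
  | nil => intro R c f h; simp at h
  | cons p L ih =>
    intro R c f h
    have hcons : (p :: L).map (pvTag c) ++ R.map (pvTag (c + 1))
        = (p.1, p.2, c) :: (L.map (pvTag c) ++ R.map (pvTag (c + 1))) := rfl
    by_cases hp : p.1 = p.2
    · have hlen : (p :: L).length + f + 1 = ((p :: L).length + f) + 1 := rfl
      rw [hlen, hcons, loopA_cons, if_pos hp]
    · obtain ⟨q, hq, hqe⟩ := h
      have hqL : q ∈ L := by
        rcases List.mem_cons.mp hq with rfl | hq'
        · exact absurd hqe hp
        · exact hq'
      have hlen : (p :: L).length + f + 1 = (L.length + f + 1) + 1 := by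
        rw [List.length_cons]; omega
      rw [hlen, hcons, loopA_cons, if_neg hp, Prod.mk.eta]
      have hq2 : L.map (pvTag c) ++ R.map (pvTag (c + 1)) ++ (pvStep p).map (pvTag (c + 1))
          = L.map (pvTag c) ++ (R ++ pvStep p).map (pvTag (c + 1)) := by simp
      rw [hq2]
      exact ih (R ++ pvStep p) c f ⟨q, hqL, hqe⟩

lemma loopA_levels (K : Nat) : ∀ (L : List (Int × Int)) (c : Int) (f : Nat),
    (∀ k < K, ∀ p ∈ pvIter L k, ¬ p.1 = p.2) →
    pvLoopA (pvSum L K + f) (L.map (pvTag c))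
      = pvLoopA f ((pvIter L K).map (pvTag (c + K))) := by
  induction K with
  | zero => intro L c f _; simp [pvSum, pvIter]
  | succ K ih =>
    intro L c f hne
    have h0 : ∀ p ∈ L, ¬ p.1 = p.2 := by
      have := hne 0 (by omega); simpa [pvIter] using this
    have hsum : pvSum L (K + 1) + f = L.length + (pvSum (L.flatMap pvStep) K + f) := by
      simp only [pvSum]; omega
    rw [hsum]
    have hlv := loopA_level L [] c (pvSum (L.flatMap pvStep) K + f) h0
    simp only [List.map_nil, List.append_nil, List.nil_append] at hlv
    rw [hlv]
    rw [ih (L.flatMap pvStep) (c + 1) f (by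
      intro k hk p hp
      exact hne (k + 1) (by omega) p (by simpa [pvIter] using hp))]
    have hc : c + 1 + (K : Int) = c + ((K : Nat) + 1 : Nat) := by push_cast; ring
    rw [hc]
    rfl

-- membership characterisations -------------------------------------------------

lemma mem_dedup_push (acc : List (Int × Int)) (a b : Int) (x : Int × Int) :
    (x ∈ if a ≤ b ∧ (a, b) ∉ acc then acc ++ [(a, b)] else acc) ↔
      x ∈ acc ∨ (x = (a, b) ∧ a ≤ b) := by
  split_ifs with h
  · simp only [List.mem_append, List.mem_singleton]
    constructor
    · rintro (hx | rfl)
      · exact Or.inl hx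
      · exact Or.inr ⟨rfl, h.1⟩
    · rintro (hx | ⟨rfl, _⟩)
      · exact Or.inl hx
      · exact Or.inr rfl
  · push Not at h
    constructor
    · exact Or.inl
    · rintro (hx | ⟨rfl, hle⟩)
      · exact hx
      · exact h hle

lemma mem_step_iff (p x : Int × Int) :
    x ∈ pvStep p ↔ (x = (p.1 + 1, p.2) ∧ p.1 + 1 ≤ p.2) ∨
      (x = (2 * p.1, p.2 + 3) ∧ 2 * p.1 ≤ p.2 + 3) := by
  unfold pvStep
  split_ifs with h1 h2 h2 <;> simp_all

lemma mem_nextB_fold : ∀ (L : List (Int × Int)) (acc : List (Int × Int)) (x : Int × Int),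
    x ∈ L.foldl (fun nxt p =>
      [(p.1 + 1, p.2), (2 * p.1, p.2 + 3)].foldl (fun nxt c =>
        if c.1 ≤ c.2 ∧ c ∉ nxt then nxt ++ [c] else nxt) nxt) acc ↔
      x ∈ acc ∨ ∃ p ∈ L, x ∈ pvStep p := by
  intro L
  induction L with
  | nil => simp
  | cons p L ih =>
    intro acc x
    rw [List.foldl_cons, ih]
    have hinner : ∀ a : List (Int × Int),
        (x ∈ [(p.1 + 1, p.2), (2 * p.1, p.2 + 3)].foldl (fun nxt c =>
          if c.1 ≤ c.2 ∧ c ∉ nxt then nxt ++ [c] else nxt) a) ↔ x ∈ a ∨ x ∈ pvStep p := by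
      intro a
      simp only [List.foldl_cons, List.foldl_nil]
      rw [mem_dedup_push, mem_dedup_push, mem_step_iff]
      tauto
    rw [hinner]
    simp only [List.mem_cons]
    constructor
    · rintro ((h | h) | ⟨q, hq, hx⟩)
      · exact Or.inl h
      · exact Or.inr ⟨p, Or.inl rfl, h⟩
      · exact Or.inr ⟨q, Or.inr hq, hx⟩
    · rintro (h | ⟨q, (rfl | hq), hx⟩)
      · exact Or.inl (Or.inl h)
      · exact Or.inl (Or.inr hx)
      · exact Or.inr ⟨q, hq, hx⟩

lemma mem_nextB (L : List (Int × Int)) (x : Int × Int) :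
    x ∈ bfsNextB L ↔ x ∈ L.flatMap pvStep := by
  unfold bfsNextB
  rw [mem_nextB_fold]
  simp [List.mem_flatMap]

lemma mem_iter_congr : ∀ (k : Nat) (L L' : List (Int × Int)),
    (∀ y, y ∈ L ↔ y ∈ L') → ∀ x, x ∈ pvIter L k ↔ x ∈ pvIter L' k := by
  intro k
  induction k with
  | zero => intro L L' h x; exact h x
  | succ k ih =>
    intro L L' h x
    show x ∈ pvIter (L.flatMap pvStep) k ↔ x ∈ pvIter (L'.flatMap pvStep) k
    refine ih _ _ (fun y => ?_) x
    simp only [List.mem_flatMap]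
    constructor
    · rintro ⟨p, hp, hy⟩; exact ⟨p, (h p).mp hp, hy⟩
    · rintro ⟨p, hp, hy⟩; exact ⟨p, (h p).mpr hp, hy⟩

lemma mem_iterB : ∀ (k : Nat) (L : List (Int × Int)) (x : Int × Int),
    x ∈ pvIterB L k ↔ x ∈ pvIter L k := by
  intro k
  induction k with
  | zero => intro L x; exact Iff.rfl
  | succ k ih =>
    intro L x
    show x ∈ pvIterB (bfsNextB L) k ↔ x ∈ pvIter (L.flatMap pvStep) k
    rw [ih]
    exact mem_iter_congr k _ _ (fun y => mem_nextB L y) x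

lemma iterB_nil : ∀ (k : Nat), pvIterB [] k = [] := by
  intro k
  induction k with
  | zero => rfl
  | succ k ih => simpa [pvIterB, bfsNextB] using ih

lemma loopB_run (K : Nat) : ∀ (L : List (Int × Int)) (c : Int) (f : Nat),
    (∀ k < K, ∀ p ∈ pvIterB L k, ¬ p.1 = p.2) →
    (∃ p ∈ pvIterB L K, p.1 = p.2) →
    bfsLoopB (K + 1 + f) c L = some (c + K) := by
  induction K with
  | zero =>
    intro L c f _ hex
    obtain ⟨p, hp, hpe⟩ := hex
    cases L with
    | nil => simp [pvIterB] at hp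
    | cons q rest =>
      have hany : ((q :: rest).any fun r => r.1 == r.2) = true :=
        List.any_eq_true.mpr ⟨p, by simpa [pvIterB] using hp, by simpa using hpe⟩
      have hf : 0 + 1 + f = f + 1 := by omega
      rw [hf, loopB_cons, if_pos hany]
      simp
  | succ K ih =>
    intro L c f hne hex
    cases L with
    | nil => rw [iterB_nil] at hex; simp at hex
    | cons q rest =>
      have hany : ((q :: rest).any fun r => r.1 == r.2) = false := by
        simp only [List.any_eq_false]
        intro p hp
        simpa using hne 0 (by omega) p (by simpa [pvIterB] using hp)
      have hf : K + 1 + 1 + f = (K + 1 + f) + 1 := by omega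
      rw [hf, loopB_cons, if_neg (by simp [hany])]
      rw [ih (bfsNextB (q :: rest)) (c + 1) f
        (fun k hk p hp => hne (k + 1) (by omega) p (by simpa [pvIterB] using hp))
        (by simpa [pvIterB] using hex)]
      congr 1
      push_cast
      ring

-- path construction ------------------------------------------------------------

lemma pvIter_succ_right : ∀ (k : Nat) (L : List (Int × Int)),
    pvIter L (k + 1) = (pvIter L k).flatMap pvStep := by
  intro k
  induction k with
  | zero => intro L; rfl
  | succ k ih =>
    intro L
    show pvIter (L.flatMap pvStep) (k + 1) = _
    rw [ih]
    rfl

lemma mem_iter_succ {L : List (Int × Int)} {k : Nat} {x y : Int × Int}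
    (hx : x ∈ pvIter L k) (hy : y ∈ pvStep x) : y ∈ pvIter L (k + 1) := by
  rw [pvIter_succ_right]
  exact List.mem_flatMap.mpr ⟨x, hx, hy⟩

lemma ones_path : ∀ (j : Nat) (L : List (Int × Int)) (k : Nat) (x : Int × Int),
    x ∈ pvIter L k → x.1 + (j : Int) ≤ x.2 → (x.1 + (j : Int), x.2) ∈ pvIter L (k + j) := by
  intro j
  induction j with
  | zero => intro L k x hx _; simpa using hx
  | succ j ih =>
    intro L k x hx hle
    have h1 : x.1 + 1 ≤ x.2 := by push_cast at hle; omega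
    have hchild : (x.1 + 1, x.2) ∈ pvStep x := by
      rw [mem_step_iff]; exact Or.inl ⟨rfl, h1⟩
    have hmem := mem_iter_succ hx hchild
    have hrec := ih L (k + 1) (x.1 + 1, x.2) hmem
      (by show x.1 + 1 + (j : Int) ≤ x.2; push_cast at hle; omega)
    have heq : x.1 + ((j : Nat) + 1 : Nat) = x.1 + 1 + (j : Int) := by push_cast; ring
    have hk : k + (j + 1) = k + 1 + j := by omega
    rw [heq, hk]
    exact hrec

lemma exists_eq_level (s t : Int) (h : Pre_bfs s t) :
    ∃ K ≤ (t - s).toNat + ((t + 3) - 2 * s).toNat + 1,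
      ∃ p ∈ pvIter [(s, t)] K, p.1 = p.2 := by
  have h0 : ((s, t) : Int × Int) ∈ pvIter [(s, t)] 0 := by simp [pvIter]
  by_cases hst : s ≤ t
  · have hcast : (((t - s).toNat : Nat) : Int) = t - s := Int.toNat_of_nonneg (by omega)
    have hp := ones_path (t - s).toNat [(s, t)] 0 (s, t) h0
      (by show s + (((t - s).toNat : Nat) : Int) ≤ t; rw [hcast]; omega)
    exact ⟨(t - s).toNat, by omega, (s + (((t - s).toNat : Nat) : Int), t),
      by simpa using hp, by show s + _ = t; rw [hcast]; omega⟩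
  · have h2 : 2 * s ≤ t + 3 := by
      rcases h with h | h
      · exact absurd h hst
      · exact h
    have hchild : ((2 * s, t + 3) : Int × Int) ∈ pvStep (s, t) := by
      rw [mem_step_iff]; exact Or.inr ⟨rfl, h2⟩
    have h1 : ((2 * s, t + 3) : Int × Int) ∈ pvIter [(s, t)] 1 := mem_iter_succ h0 hchild
    have hcast : ((((t + 3) - 2 * s).toNat : Nat) : Int) = (t + 3) - 2 * s :=
      Int.toNat_of_nonneg (by omega)
    have hp := ones_path ((t + 3) - 2 * s).toNat [(s, t)] 1 (2 * s, t + 3) h1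
      (by show 2 * s + ((((t + 3) - 2 * s).toNat : Nat) : Int) ≤ t + 3; rw [hcast]; omega)
    exact ⟨1 + ((t + 3) - 2 * s).toNat, by omega,
      (2 * s + ((((t + 3) - 2 * s).toNat : Nat) : Int), t + 3),
      by simpa using hp, by show 2 * s + _ = t + 3; rw [hcast]; omega⟩

-- size bounds ------------------------------------------------------------------

lemma step_len (p : Int × Int) : (pvStep p).length ≤ 2 := by
  unfold pvStep; split_ifs <;> simp

lemma flatMap_len (L : List (Int × Int)) : (L.flatMap pvStep).length ≤ 2 * L.length := by
  induction L with
  | nil => simp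
  | cons p L ih =>
    rw [List.flatMap_cons]
    have := step_len p
    simp only [List.length_append, List.length_cons]
    omega

lemma sum_iter_bound : ∀ (K : Nat) (L : List (Int × Int)),
    pvSum L K + (pvIter L K).length + L.length ≤ 2 * L.length * 2 ^ K := by
  intro K
  induction K with
  | zero => intro L; simp [pvSum, pvIter]; omega
  | succ K ih =>
    intro L
    have h1 := ih (L.flatMap pvStep)
    have h2 := flatMap_len L
    simp only [pvSum, pvIter]
    have hpow : (2:Nat) ^ (K + 1) = 2 * 2 ^ K := by ring
    have hP : (1:Nat) ≤ 2 ^ K := Nat.one_le_two_pow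
    zify at h1 h2 ⊢
    have hPz : (1:Int) ≤ 2 ^ K := by exact_mod_cast hP
    nlinarith [mul_nonneg (sub_nonneg.mpr h2)
      (by nlinarith : (0:Int) ≤ 2 * 2 ^ K - 1)]

-- main proof -------------------------------------------------------------------

theorem bfs_eq_alt (s t : Int) (h : Pre_bfs s t) : bfs s t = bfs_alt s t := by
  obtain ⟨Kw, hKw, hPw⟩ := exists_eq_level s t h
  have hex : ∃ k, ∃ p ∈ pvIter [(s, t)] k, p.1 = p.2 := ⟨Kw, hPw⟩
  classical
  set K := Nat.find hex with hKdef
  have hK : ∃ p ∈ pvIter [(s, t)] K, p.1 = p.2 := Nat.find_spec hex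
  have hmin : ∀ k < K, ∀ p ∈ pvIter [(s, t)] k, ¬ p.1 = p.2 := by
    intro k hk p hp hpe
    exact Nat.find_min hex hk ⟨p, hp, hpe⟩
  have hKle : K ≤ (t - s).toNat + ((t + 3) - 2 * s).toNat + 1 :=
    le_trans (Nat.find_min' hex hPw) hKw
  -- A side
  have hbound := sum_iter_bound K [(s, t)]
  have hlen1 : ([((s, t) : Int × Int)]).length = 1 := rfl
  rw [hlen1] at hbound
  have hfuelA : pvSum [(s, t)] K + ((pvIter [(s, t)] K).length + 0 + 1) ≤ bfsFuelA s t := by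
    unfold bfsFuelA
    have hexp : K + 1 ≤ (t - s).toNat + ((t + 3) - 2 * s).toNat + 3 := by omega
    have hpow := Nat.pow_le_pow_right (by norm_num : 1 ≤ 2) hexp
    have h21 : 2 * 1 * 2 ^ K = 2 ^ (K + 1) := by ring
    omega
  obtain ⟨f2, hf2⟩ : ∃ f2,
      bfsFuelA s t = pvSum [(s, t)] K + ((pvIter [(s, t)] K).length + f2 + 1) :=
    ⟨bfsFuelA s t - pvSum [(s, t)] K - (pvIter [(s, t)] K).length - 1, by omega⟩
  have hstart : [((s : Int), (t : Int), (0 : Int))] = [((s, t) : Int × Int)].map (pvTag 0) := rfl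
  have hA : bfsLoopA (bfsFuelA s t) [(s, t, 0)] [] = some ((0 : Int) + (K : Int)) := by
    rw [loopA_two_list]
    simp only [List.reverse_nil, List.append_nil]
    rw [hstart, hf2, loopA_levels K [(s, t)] 0 _ hmin]
    have hfound := loopA_found (pvIter [(s, t)] K) [] ((0 : Int) + (K : Int)) f2 hK
    simpa using hfound
  -- B side
  have hB : bfsLoopB (bfsFuelB s t) 0 [(s, t)] = some ((0 : Int) + (K : Int)) := by
    have hfB : K + 1 ≤ bfsFuelB s t := by unfold bfsFuelB; omega
    obtain ⟨f, hf⟩ : ∃ f, bfsFuelB s t = K + 1 + f := ⟨bfsFuelB s t - (K + 1), by omega⟩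
    rw [hf]
    exact loopB_run K [(s, t)] 0 f
      (fun k hk p hp => hmin k hk p ((mem_iterB k [(s, t)] p).mp hp))
      (by obtain ⟨p, hp, hpe⟩ := hK; exact ⟨p, (mem_iterB K [(s, t)] p).mpr hp, hpe⟩)
  unfold bfs bfs_alt
  rw [hA, hB]

-- ===== VERDICT (by name: the statement is the Claim_ definition above) =====
theorem bfs_spec : Claim_equal_bfs := by
  intro s t _ hpre
  unfold Spec_bfs
  exact bfs_eq_alt s t hpre
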